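-- pv_equiv track=rewrite | github.com/Silfurdreki/AoC2025 | day3/p1.py | find_largest
-- ===== SOURCE A (Python) =====
-- def find_largest(row: list, start_i: int, end_i: int | None) -> tuple:
--     highest = 9
--     for highest in range(9, -1, -1):
--         index = start_i
--         for jolt in row[start_i:end_i]:
--             if jolt == highest:
--                 return index, highest
--             index += 1
-- ===== SOURCE B (Python) =====
-- def find_largest(row, start_i, end_i):
--     best = None
--     index = start_i
--     for jolt in row[start_i:end_i]:
--         if 0 <= jolt <= 9 and (best is None or jolt > best[1]):
--             best = (index, jolt)
--         index += 1
--     return best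
-- ===== Notes on version B (the rewrite author's own statement) =====
-- stated objective: simpler
-- what changed: A rescans the slice up to ten times, once per candidate value 9..0; B makes a single pass over the slice keeping a running (first-index, value) maximum restricted to 0..9.
import Mathlib
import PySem

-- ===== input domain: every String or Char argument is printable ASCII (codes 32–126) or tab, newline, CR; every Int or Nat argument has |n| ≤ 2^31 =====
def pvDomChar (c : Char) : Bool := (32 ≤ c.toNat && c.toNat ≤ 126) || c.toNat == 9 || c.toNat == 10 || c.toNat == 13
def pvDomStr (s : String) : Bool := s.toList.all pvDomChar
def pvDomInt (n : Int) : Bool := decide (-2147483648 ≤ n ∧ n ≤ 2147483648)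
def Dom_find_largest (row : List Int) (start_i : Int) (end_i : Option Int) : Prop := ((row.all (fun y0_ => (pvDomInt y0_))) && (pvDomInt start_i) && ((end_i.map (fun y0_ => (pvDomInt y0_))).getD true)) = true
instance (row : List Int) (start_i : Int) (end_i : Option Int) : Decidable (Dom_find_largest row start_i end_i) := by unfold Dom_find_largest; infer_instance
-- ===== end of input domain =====

-- B replaces A's up-to-ten re-scans of the slice (one per candidate value 9..0) by a
-- single pass keeping a running (first-index, value) maximum over 0..9 (objective: simpler).

-- ===== PORT A =====
-- inner loop of A: scan the slice with a running index, return the index of the first element equal to h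
def pvScanA (s : List Int) (index : Int) (h : Int) : Option Int :=
  match s with
  | [] => none
  | jolt :: rest => if jolt = h then some index else pvScanA rest (index + 1) h

-- outer loop of A over 'for highest in range(9, -1, -1)'
def pvOuterA (s : List Int) (start_i : Int) (hs : List Int) : Option (Int × Int) :=
  match hs with
  | [] => none
  | highest :: rest =>
    match pvScanA s start_i highest with
    | some index => some (index, highest)
    | none => pvOuterA s start_i rest

def find_largest (row : List Int) (start_i : Int) (end_i : Option Int) : Option (Int × Int) :=
  pvOuterA (PySem.List.slice row (some start_i) end_i) start_i (PySem.List.pyRange 9 (-1) (-1))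

-- ===== PORT B =====
-- B's single loop: 'if 0 <= jolt <= 9 and (best is None or jolt > best[1]): best = (index, jolt)'
def pvBestB (s : List Int) (index : Int) (best : Option (Int × Int)) : Option (Int × Int) :=
  match s with
  | [] => best
  | jolt :: rest =>
    pvBestB rest (index + 1)
      (if (decide (0 ≤ jolt) && decide (jolt ≤ 9) &&
            (match best with | none => true | some b => decide (b.2 < jolt))) = true
       then some (index, jolt) else best)

def find_largest_alt (row : List Int) (start_i : Int) (end_i : Option Int) : Option (Int × Int) :=
  pvBestB (PySem.List.slice row (some start_i) end_i) start_i none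

-- ===== PRECONDITION & SPEC =====
def Spec_find_largest (row : List Int) (start_i : Int) (end_i : Option Int) (out : Option (Int × Int)) : Prop := out = find_largest_alt row start_i end_i
instance (row : List Int) (start_i : Int) (end_i : Option Int) (out : Option (Int × Int)) : Decidable (Spec_find_largest row start_i end_i out) := by unfold Spec_find_largest; infer_instance

-- ===== CLAIM (what is proved, stated in full; the proofs are below) =====
def Claim_equal_find_largest : Prop := ∀ (row : List Int) (start_i : Int) (end_i : Option Int), Dom_find_largest row start_i end_i → Spec_find_largest row start_i end_i (find_largest row start_i end_i)

-- ===== LEMMAS AND PROOFS =====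

-- proof-side reference: the maximal element of s satisfying p (value only)
def pvMaxF (p : Int → Bool) (s : List Int) : Option Int :=
  match s with
  | [] => none
  | j :: rest =>
    match pvMaxF p rest with
    | none => if p j then some j else none
    | some m => if p j then some (max j m) else some m

theorem pvMaxF_none (p : Int → Bool) (s : List Int) :
    pvMaxF p s = none ↔ ∀ j ∈ s, p j = false := by
  induction s with
  | nil => simp [pvMaxF]
  | cons j rest ih =>
    simp only [pvMaxF, List.mem_cons]
    rcases hr : pvMaxF p rest with _ | m <;> rcases hp : p j with _ | _ <;>
      simp_all

theorem pvMaxF_mem (p : Int → Bool) (s : List Int) (m : Int)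
    (h : pvMaxF p s = some m) : m ∈ s ∧ p m = true := by
  induction s generalizing m with
  | nil => simp [pvMaxF] at h
  | cons j rest ih =>
    simp only [pvMaxF] at h
    rcases hr : pvMaxF p rest with _ | m' <;> simp only [hr] at h
    · by_cases hp : p j = true
      · rw [if_pos hp] at h
        injection h with h; subst h
        exact ⟨List.mem_cons_self, hp⟩
      · rw [if_neg hp] at h; exact absurd h (by simp)
    · by_cases hp : p j = true
      · rw [if_pos hp] at h
        injection h with h
        rcases max_choice j m' with hm | hm <;> rw [hm] at h <;> subst h
        · exact ⟨List.mem_cons_self, hp⟩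
        · exact ⟨List.mem_cons_of_mem _ (ih m' hr).1, (ih m' hr).2⟩
      · rw [if_neg hp] at h
        injection h with h; subst h
        exact ⟨List.mem_cons_of_mem _ (ih m' hr).1, (ih m' hr).2⟩

theorem pvMaxF_le (p : Int → Bool) (s : List Int) (m : Int)
    (h : pvMaxF p s = some m) : ∀ j ∈ s, p j = true → j ≤ m := by
  induction s generalizing m with
  | nil => simp [pvMaxF] at h
  | cons j rest ih =>
    intro x hx hpx
    simp only [pvMaxF] at h
    rcases hr : pvMaxF p rest with _ | m' <;> simp only [hr] at h
    · by_cases hp : p j = true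
      · rw [if_pos hp] at h
        injection h with h; subst h
        rcases List.mem_cons.mp hx with hx | hx
        · exact le_of_eq hx
        · exact absurd hpx (by simpa using (pvMaxF_none p rest).mp hr x hx)
      · rw [if_neg hp] at h; exact absurd h (by simp)
    · by_cases hp : p j = true
      · rw [if_pos hp] at h
        injection h with h; subst h
        rcases List.mem_cons.mp hx with hx | hx
        · subst hx; exact le_max_left x m'
        · exact le_trans (ih m' hr x hx hpx) (le_max_right j m')
      · rw [if_neg hp] at h
        injection h with h; subst h
        rcases List.mem_cons.mp hx with hx | hx
        · subst hx; exact absurd hpx (by simp [hp])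
        · exact ih m' hr x hx hpx

theorem pvMaxF_congr (p q : Int → Bool) (s : List Int)
    (h : ∀ j ∈ s, p j = q j) : pvMaxF p s = pvMaxF q s := by
  induction s with
  | nil => rfl
  | cons j rest ih =>
    simp only [pvMaxF]
    rw [ih (fun x hx => h x (List.mem_cons_of_mem j hx)), h j (List.mem_cons_self)]

-- A's inner scan finds nothing iff the value is absent
theorem pvScanA_none (s : List Int) (i h : Int) :
    pvScanA s i h = none ↔ h ∉ s := by
  induction s generalizing i with
  | nil => simp [pvScanA]
  | cons j rest ih =>
    simp only [pvScanA, List.mem_cons]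
    by_cases hj : j = h
    · simp [hj]
    · rw [if_neg hj, ih]
      simp only [not_or]
      exact ⟨fun hnr => ⟨fun hh => hj hh.symm, hnr⟩, And.right⟩

-- descending candidate list [n-1, ..., 0]
def pvDesc : Nat → List Int
  | 0 => []
  | n + 1 => (n : Int) :: pvDesc n

-- characterisation of A's nested loops
theorem pvA_char (n : Nat) (s : List Int) (i : Int) :
    pvOuterA s i (pvDesc n) =
      match pvMaxF (fun j => decide (0 ≤ j) && decide (j < (n : Int))) s with
      | none => none
      | some m => (pvScanA s i m).map (fun y => (y, m)) := by
  induction n with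
  | zero =>
    have h0 : pvMaxF (fun j => decide (0 ≤ j) && decide (j < (0 : Int))) s = none :=
      (pvMaxF_none _ s).mpr (fun j _ => by
        simp only [Bool.and_eq_false_iff, decide_eq_false_iff_not]; omega)
    simp [pvDesc, pvOuterA, h0]
  | succ n ih =>
    simp only [pvDesc, pvOuterA]
    rcases hsc : pvScanA s i (n : Int) with _ | x
    · -- n not in s: the candidate set is unchanged
      have hnm : (n : Int) ∉ s := (pvScanA_none s i (n : Int)).mp hsc
      have hcg : pvMaxF (fun j => decide (0 ≤ j) && decide (j < ((n + 1 : Nat) : Int))) s =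
          pvMaxF (fun j => decide (0 ≤ j) && decide (j < (n : Int))) s := by
        refine pvMaxF_congr _ _ s (fun j hj => ?_)
        have hne : j ≠ (n : Int) := fun h => hnm (h ▸ hj)
        have hd : decide (j < ((n + 1 : Nat) : Int)) = decide (j < (n : Int)) :=
          decide_eq_decide.mpr (by push_cast; omega)
        rw [hd]
      rw [hcg]; exact ih
    · -- n occurs in s: it is the maximum of the candidates below n+1
      have hmem : (n : Int) ∈ s := by
        by_contra hmm
        exact absurd ((pvScanA_none s i (n : Int)).mpr hmm) (by simp [hsc])
      have hpn : (fun j => decide (0 ≤ j) && decide (j < ((n + 1 : Nat) : Int))) (n : Int) = true := by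
        simp only [Bool.and_eq_true, decide_eq_true_eq]
        constructor
        · exact Int.natCast_nonneg n
        · push_cast; omega
      have hmax : pvMaxF (fun j => decide (0 ≤ j) && decide (j < ((n + 1 : Nat) : Int))) s = some (n : Int) := by
        rcases hq : pvMaxF (fun j => decide (0 ≤ j) && decide (j < ((n + 1 : Nat) : Int))) s with _ | m
        · exact absurd ((pvMaxF_none _ s).mp hq (n : Int) hmem) (by simp [hpn])
        · have h1 := pvMaxF_le _ s m hq (n : Int) hmem hpn
          have h2 := (pvMaxF_mem _ s m hq).2
          simp only [Bool.and_eq_true, decide_eq_true_eq] at h2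
          have : m = (n : Int) := by
            have h3 := h2.2; push_cast at h3; omega
          rw [this]
      rw [hmax]
      simp [hsc]

-- B's running-best condition, named for the proofs (definitionally the port's test)
def pvP (best : Option (Int × Int)) (j : Int) : Bool :=
  decide (0 ≤ j) && decide (j ≤ 9) && (match best with | none => true | some b => decide (b.2 < j))

theorem pvP_elim (best : Option (Int × Int)) (j : Int) (h : pvP best j = true) :
    0 ≤ j ∧ j ≤ 9 ∧ (∀ x v, best = some (x, v) → v < j) := by
  simp only [pvP, Bool.and_eq_true, decide_eq_true_eq] at h
  refine ⟨h.1.1, h.1.2, fun x v hb => ?_⟩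
  subst hb
  simpa using h.2

theorem pvP_intro (best : Option (Int × Int)) (j : Int) (h0 : 0 ≤ j) (h9 : j ≤ 9)
    (ht : ∀ x v, best = some (x, v) → v < j) : pvP best j = true := by
  simp only [pvP, Bool.and_eq_true, decide_eq_true_eq]
  refine ⟨⟨h0, h9⟩, ?_⟩
  rcases best with _ | ⟨x, v⟩
  · rfl
  · simpa using ht x v rfl

-- characterisation of B's single pass
theorem pvB_char (s : List Int) (i : Int) (best : Option (Int × Int)) :
    pvBestB s i best =
      match pvMaxF (pvP best) s with
      | none => best
      | some m => (pvScanA s i m).map (fun y => (y, m)) := by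
  induction s generalizing i best with
  | nil => simp [pvBestB, pvMaxF]
  | cons jolt rest ih =>
    have hstep : pvBestB (jolt :: rest) i best =
        pvBestB rest (i + 1) (if pvP best jolt = true then some (i, jolt) else best) := rfl
    rw [hstep]
    rcases hc : pvP best jolt with _ | _
    · -- element rejected
      rw [if_neg (by simp [hc])]
      rw [ih]
      have hcons : pvMaxF (pvP best) (jolt :: rest) = pvMaxF (pvP best) rest := by
        simp only [pvMaxF]
        rcases pvMaxF (pvP best) rest with _ | m <;> simp [hc]
      rw [hcons]
      rcases hq : pvMaxF (pvP best) rest with _ | m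
      · rfl
      · have hm := pvMaxF_mem _ rest m hq
        have hne : jolt ≠ m := fun h => by rw [h] at hc; simp [hm.2] at hc
        simp [pvScanA, hne]
    · -- element accepted: best becomes (i, jolt)
      rw [if_pos rfl, ih]
      have hcons : pvMaxF (pvP best) (jolt :: rest) =
          match pvMaxF (pvP best) rest with
          | none => some jolt
          | some m => some (max jolt m) := by
        simp only [pvMaxF]
        rcases pvMaxF (pvP best) rest with _ | m <;> simp [hc]
      obtain ⟨hc0, hc9, hct⟩ := pvP_elim best jolt hc
      rcases hr : pvMaxF (pvP (some (i, jolt))) rest with _ | m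
      · -- no later element beats jolt
        have hnone := (pvMaxF_none _ rest).mp hr
        rcases hq : pvMaxF (pvP best) rest with _ | m
        · simp [hcons, hq, pvScanA]
        · have hm := pvMaxF_mem _ rest m hq
          obtain ⟨hm0, hm9, _⟩ := pvP_elim best m hm.2
          have hle : m ≤ jolt := by
            by_contra hgt
            have hp' : pvP (some (i, jolt)) m = true :=
              pvP_intro _ m hm0 hm9 (fun x v hv => by
                injection hv with hv; injection hv with h1 h2
                omega)
            exact absurd (hnone m hm.1) (by simp [hp'])
          have hmx : max jolt m = jolt := max_eq_left hle
          simp [hcons, hq, hmx, pvScanA]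
      · -- m > jolt is the max of the rest beating jolt
        have hm := pvMaxF_mem _ rest m hr
        obtain ⟨hm0, hm9, hmt⟩ := pvP_elim _ m hm.2
        have hjm : jolt < m := hmt i jolt rfl
        have hpm : pvP best m = true :=
          pvP_intro best m hm0 hm9 (fun x v hv => lt_trans (hct x v hv) hjm)
        rcases hq : pvMaxF (pvP best) rest with _ | m'
        · exact absurd ((pvMaxF_none _ rest).mp hq m hm.1) (by simp [hpm])
        · have hm'' := pvMaxF_mem _ rest m' hq
          have h1 : m ≤ m' := pvMaxF_le _ rest m' hq m hm.1 hpm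
          obtain ⟨hq0, hq9, _⟩ := pvP_elim best m' hm''.2
          have hpm' : pvP (some (i, jolt)) m' = true :=
            pvP_intro _ m' hq0 hq9 (fun x v hv => by
              injection hv with hv; injection hv with h1 h2
              omega)
          have h2 : m' ≤ m := pvMaxF_le _ rest m hr m' hm''.1 hpm'
          have hmm : m' = m := le_antisymm h2 h1
          subst hmm
          have hmax : max jolt m' = m' := max_eq_right (le_of_lt hjm)
          have hne : jolt ≠ m' := ne_of_lt hjm
          simp [hcons, hq, hmax, pvScanA, hne]

-- range(9, -1, -1) is the descending list [9,...,0]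
theorem pvRange_desc : PySem.List.pyRange 9 (-1) (-1) = pvDesc 10 := by decide

-- ===== VERDICT (by name: the statement is the Claim_ definition above) =====
theorem find_largest_spec : Claim_equal_find_largest := by
  intro row start_i end_i _
  unfold Spec_find_largest find_largest find_largest_alt
  rw [pvRange_desc, pvA_char 10, pvB_char]
  have hcg : pvMaxF (fun j => decide (0 ≤ j) && decide (j < ((10 : Nat) : Int)))
      (PySem.List.slice row (some start_i) end_i) =
      pvMaxF (pvP none) (PySem.List.slice row (some start_i) end_i) := by
    refine pvMaxF_congr _ _ _ (fun j _ => ?_)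
    have hd : decide (j < ((10 : Nat) : Int)) = decide (j ≤ (9 : Int)) :=
      decide_eq_decide.mpr (by push_cast; omega)
    simp only [pvP, Bool.and_true]
    rw [hd]
  rw [hcg]
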